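-- pv_equiv track=rewrite | github.com/akashanup/75DaysChallenge | 89.GrayCode/backtracking-solution.py | isValid
-- ===== SOURCE A (Python) =====
-- def isValid(num1, num2):
--     diff = 0
--     for i in range(32):
--         diff += int((num1 & 1) != (num2 & 1))
--         if diff > 1:
--             return False
--         num1 >>= 1
--         num2 >>= 1
--     return diff == 1
-- ===== SOURCE B (Python) =====
-- def isValid(num1, num2):
--     x = (num1 ^ num2) & 0xFFFFFFFF
--     return x != 0 and (x & (x - 1)) == 0
-- ===== Notes on version B (the rewrite author's own statement) =====
-- stated objective: idiomatic
-- what changed: Replaces the 32-iteration bit-by-bit difference-counting loop with the closed-form power-of-two test x != 0 and x & (x-1) == 0 on the 32-bit-masked XOR of the two numbers.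
import Mathlib
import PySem

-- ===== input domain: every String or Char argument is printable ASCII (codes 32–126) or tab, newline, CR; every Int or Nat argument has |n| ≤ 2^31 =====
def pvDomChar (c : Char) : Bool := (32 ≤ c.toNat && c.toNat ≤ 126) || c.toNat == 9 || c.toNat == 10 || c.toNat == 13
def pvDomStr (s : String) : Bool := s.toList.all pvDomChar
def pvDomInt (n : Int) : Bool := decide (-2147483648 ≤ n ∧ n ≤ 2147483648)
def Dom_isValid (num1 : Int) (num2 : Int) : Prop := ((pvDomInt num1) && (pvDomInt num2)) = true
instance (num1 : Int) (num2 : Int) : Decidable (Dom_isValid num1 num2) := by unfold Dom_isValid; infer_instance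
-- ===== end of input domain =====

-- B replaces A's 32-iteration bit-difference-counting loop by the closed-form power-of-two
-- test on the 32-bit-masked XOR of the inputs (objective: idiomatic; return values proved equal).

-- ===== PORT A =====
-- the for-loop of A: k iterations remaining, current num1/num2/diff; early `return False` kept
def isValidGo : Nat → Int → Int → Int → Bool
  | 0, _, _, diff => diff == 1
  | k+1, n1, n2, diff =>
    let d : Int := diff + (if PySem.Int.band n1 1 ≠ PySem.Int.band n2 1 then 1 else 0)
    if d > 1 then false
    else isValidGo k (n1 >>> (1:Nat)) (n2 >>> (1:Nat)) d

def isValid (num1 : Int) (num2 : Int) : Bool := isValidGo 32 num1 num2 0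

-- ===== PORT B =====
def isValid_alt (num1 : Int) (num2 : Int) : Bool :=
  let x := PySem.Int.band (PySem.Int.bxor num1 num2) 0xFFFFFFFF
  (x != 0) && (PySem.Int.band x (x - 1) == 0)

-- ===== PRECONDITION & SPEC =====
def Spec_isValid (num1 : Int) (num2 : Int) (out : Bool) : Prop := out = isValid_alt num1 num2
instance (num1 : Int) (num2 : Int) (out : Bool) : Decidable (Spec_isValid num1 num2 out) := by unfold Spec_isValid; infer_instance

-- ===== CLAIM (what is proved, stated in full; the proofs are below) =====
def Claim_equal_isValid : Prop := ∀ (num1 : Int) (num2 : Int), Dom_isValid num1 num2 → Spec_isValid num1 num2 (isValid num1 num2)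

-- ===== LEMMAS AND PROOFS =====

-- number of 1s among the low k bits of a natural number
def cntN : Nat → Nat → Nat
  | 0, _ => 0
  | k+1, m => m % 2 + cntN k (m / 2)

-- the same count for an integer, via floor-division arithmetic
def xcnt : Nat → Int → Int
  | 0, _ => 0
  | k+1, x => x % 2 + xcnt k (x / 2)

-- number of positions among the low k bits where a and b differ (A's `diff` contribution)
def dcnt : Nat → Int → Int → Int
  | 0, _, _ => 0
  | k+1, a, b => (if PySem.Int.band a 1 ≠ PySem.Int.band b 1 then 1 else 0) + dcnt k (a >>> (1:Nat)) (b >>> (1:Nat))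

theorem dcnt_nonneg (k : Nat) : ∀ a b : Int, 0 ≤ dcnt k a b := by
  induction k with
  | zero => intro a b; simp [dcnt]
  | succ k ih =>
    intro a b
    have := ih (a >>> (1:Nat)) (b >>> (1:Nat))
    simp only [dcnt]
    split <;> omega

theorem go_eq (k : Nat) : ∀ (a b diff : Int),
    isValidGo k a b diff = decide (diff + dcnt k a b = 1) := by
  induction k with
  | zero =>
    intro a b diff
    simp only [isValidGo, dcnt, add_zero]
    by_cases h : diff = 1 <;> simp [h]
  | succ k ih =>
    intro a b diff
    have hnn := dcnt_nonneg k (a >>> (1:Nat)) (b >>> (1:Nat))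
    simp only [isValidGo, dcnt, ih]
    by_cases hb : PySem.Int.band a 1 ≠ PySem.Int.band b 1
    · have h1 : (if PySem.Int.band a 1 ≠ PySem.Int.band b 1 then (1:Int) else 0) = 1 := if_pos hb
      simp only [h1]
      split_ifs with hd
      · symm
        simp only [decide_eq_false_iff_not]
        omega
      · simp only [decide_eq_decide]
        omega
    · have h1 : (if PySem.Int.band a 1 ≠ PySem.Int.band b 1 then (1:Int) else 0) = 0 := if_neg hb
      simp only [h1]
      split_ifs with hd
      · symm
        simp only [decide_eq_false_iff_not]
        omega
      · simp only [decide_eq_decide]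
        omega

theorem band_one_emod (a : Int) : PySem.Int.band a 1 = a % 2 := by
  rw [PySem.Int.band_one, PySem.Int.mod_eq_emod_of_pos (by norm_num)]

theorem shiftRight_one_int (a : Int) : a >>> (1:Nat) = a / 2 := by
  cases a with
  | ofNat n =>
    show ((n >>> 1 : Nat) : Int) = (n : Int) / 2
    rw [Nat.shiftRight_one]
    omega
  | negSucc n =>
    show Int.negSucc (n >>> 1) = Int.negSucc n / 2
    rw [Nat.shiftRight_one, Int.negSucc_eq, Int.negSucc_eq]
    omega

theorem bxor_emod_two (a b : Int) :
    PySem.Int.bxor a b % 2 = if a % 2 = b % 2 then 0 else 1 := by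
  unfold PySem.Int.bxor
  by_cases ha : 0 ≤ a <;> by_cases hb : 0 ≤ b
  · have h := Nat.xor_mod_two_eq (m := a.toNat) (n := b.toNat)
    simp only [if_pos ha, if_pos hb]
    split <;> omega
  · have h := Nat.xor_mod_two_eq (m := a.toNat) (n := (-b-1).toNat)
    simp only [if_pos ha, if_neg hb]
    split <;> omega
  · have h := Nat.xor_mod_two_eq (m := (-a-1).toNat) (n := b.toNat)
    simp only [if_neg ha, if_pos hb]
    split <;> omega
  · have h := Nat.xor_mod_two_eq (m := (-a-1).toNat) (n := (-b-1).toNat)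
    simp only [if_neg ha, if_neg hb]
    split <;> omega

theorem bxor_ediv_two (a b : Int) :
    PySem.Int.bxor a b / 2 = PySem.Int.bxor (a / 2) (b / 2) := by
  unfold PySem.Int.bxor
  by_cases ha : 0 ≤ a <;> by_cases hb : 0 ≤ b
  · have ha2 : 0 ≤ a / 2 := by omega
    have hb2 : 0 ≤ b / 2 := by omega
    simp only [if_pos ha, if_pos hb, if_pos ha2, if_pos hb2]
    have hxd : (a.toNat ^^^ b.toNat) / 2 = a.toNat / 2 ^^^ b.toNat / 2 := Nat.xor_div_two
    have h4 : a.toNat / 2 = (a / 2).toNat := by omega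
    have h5 : b.toNat / 2 = (b / 2).toNat := by omega
    rw [h4, h5] at hxd
    omega
  · have ha2 : 0 ≤ a / 2 := by omega
    have hb2 : ¬ 0 ≤ b / 2 := by omega
    simp only [if_pos ha, if_neg hb, if_pos ha2, if_neg hb2]
    have hxd : (a.toNat ^^^ (-b-1).toNat) / 2 = a.toNat / 2 ^^^ (-b-1).toNat / 2 := Nat.xor_div_two
    have h4 : a.toNat / 2 = (a / 2).toNat := by omega
    have h5 : (-b-1).toNat / 2 = (-(b/2)-1).toNat := by omega
    rw [h4, h5] at hxd
    omega
  · have ha2 : ¬ 0 ≤ a / 2 := by omega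
    have hb2 : 0 ≤ b / 2 := by omega
    simp only [if_neg ha, if_pos hb, if_neg ha2, if_pos hb2]
    have hxd : ((-a-1).toNat ^^^ b.toNat) / 2 = (-a-1).toNat / 2 ^^^ b.toNat / 2 := Nat.xor_div_two
    have h4 : (-a-1).toNat / 2 = (-(a/2)-1).toNat := by omega
    have h5 : b.toNat / 2 = (b / 2).toNat := by omega
    rw [h4, h5] at hxd
    omega
  · have ha2 : ¬ 0 ≤ a / 2 := by omega
    have hb2 : ¬ 0 ≤ b / 2 := by omega
    simp only [if_neg ha, if_neg hb, if_neg ha2, if_neg hb2]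
    have hxd : ((-a-1).toNat ^^^ (-b-1).toNat) / 2 = (-a-1).toNat / 2 ^^^ (-b-1).toNat / 2 := Nat.xor_div_two
    have h4 : (-a-1).toNat / 2 = (-(a/2)-1).toNat := by omega
    have h5 : (-b-1).toNat / 2 = (-(b/2)-1).toNat := by omega
    rw [h4, h5] at hxd
    omega

theorem dcnt_eq_xcnt (k : Nat) : ∀ a b : Int, dcnt k a b = xcnt k (PySem.Int.bxor a b) := by
  induction k with
  | zero => intro a b; simp [dcnt, xcnt]
  | succ k ih =>
    intro a b
    simp only [dcnt, xcnt, ih, shiftRight_one_int, bxor_ediv_two, bxor_emod_two]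
    by_cases h : a % 2 = b % 2
    · simp [h, band_one_emod]
    · simp [h, band_one_emod]

theorem xcnt_congr (k : Nat) : ∀ (x t : Int), xcnt k (x + t * 2 ^ k) = xcnt k x := by
  induction k with
  | zero => intro x t; simp [xcnt]
  | succ k ih =>
    intro x t
    have he : x + t * 2 ^ (k+1) = x + (t * 2 ^ k) * 2 := by ring
    have hm : (x + t * 2 ^ (k+1)) % 2 = x % 2 := by rw [he]; omega
    have hd : (x + t * 2 ^ (k+1)) / 2 = x / 2 + t * 2 ^ k := by rw [he]; omega
    simp only [xcnt, hm, hd, ih]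

theorem xcnt_emod32 (x : Int) : xcnt 32 (x % 4294967296) = xcnt 32 x := by
  have h : x = x % 4294967296 + (x / 4294967296) * 2 ^ 32 := by
    have := Int.emod_add_mul_ediv x 4294967296
    norm_num
    omega
  conv_rhs => rw [h]
  rw [xcnt_congr]

theorem band_mask (x : Int) : PySem.Int.band x 0xFFFFFFFF = x % 4294967296 := by
  unfold PySem.Int.band
  by_cases hx : 0 ≤ x <;> simp only [hx, if_true, if_false] <;> norm_num
  · have h := Nat.and_two_pow_sub_one_eq_mod x.toNat 32
    rw [show ((4294967295:Int).toNat) = 4294967295 from rfl]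
    norm_num at h
    omega
  · have h := Nat.and_two_pow_sub_one_eq_mod (-x-1).toNat 32
    rw [Nat.and_comm] at h
    rw [show ((4294967295:Int).toNat) = 4294967295 from rfl]
    norm_num at h
    omega

theorem xcnt_natCast (k : Nat) : ∀ m : Nat, xcnt k (m : Int) = (cntN k m : Int) := by
  induction k with
  | zero => intro m; simp [xcnt, cntN]
  | succ k ih =>
    intro m
    have hm : (m : Int) % 2 = ((m % 2 : Nat) : Int) := by omega
    have hd : (m : Int) / 2 = ((m / 2 : Nat) : Int) := by omega
    simp only [xcnt, cntN, hm, hd, ih]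
    push_cast
    ring

theorem cntN_zero (k : Nat) : cntN k 0 = 0 := by
  induction k with
  | zero => rfl
  | succ k ih => simp [cntN, ih]

theorem cntN_eq_zero (k : Nat) : ∀ m : Nat, m < 2 ^ k → (cntN k m = 0 ↔ m = 0) := by
  induction k with
  | zero => intro m hm; interval_cases m <;> simp [cntN]
  | succ k ih =>
    intro m hm
    have := ih (m / 2) (by omega)
    simp only [cntN]
    omega

theorem land_bit (a b pa pb : Nat) (hpa : pa < 2) (hpb : pb < 2) :
    (2 * a + pa) &&& (2 * b + pb) = 2 * (a &&& b) + (pa &&& pb) := by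
  apply Nat.eq_of_testBit_eq
  intro i
  cases i with
  | zero =>
    simp only [Nat.testBit_zero, Nat.mul_add_mod]
    interval_cases pa <;> interval_cases pb <;> simp
  | succ i =>
    have h1 : (2 * a + pa) / 2 = a := by omega
    have h2 : (2 * b + pb) / 2 = b := by omega
    have h3 : (2 * (a &&& b) + (pa &&& pb)) / 2 = a &&& b := by
      have : pa &&& pb < 2 := by interval_cases pa <;> interval_cases pb <;> decide
      omega
    simp only [Nat.testBit_add_one, Nat.and_div_two, h1, h2, h3, Nat.testBit_and]

theorem cntN_one_iff (k : Nat) : ∀ m : Nat, m < 2 ^ k →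
    (cntN k m = 1 ↔ (m ≠ 0 ∧ m &&& (m - 1) = 0)) := by
  induction k with
  | zero => intro m hm; interval_cases m <;> simp [cntN]
  | succ k ih =>
    intro m hm
    rcases Nat.eq_zero_or_pos m with h0 | h0
    · subst h0; simp [cntN_zero]
    rcases Nat.even_or_odd m with he | ho
    · -- m even, m > 0 : m = 2 * (m/2), m/2 > 0
      obtain ⟨q, hq⟩ := he
      have hq2 : m = 2 * q := by omega
      have hqpos : 0 < q := by omega
      have hand : m &&& (m - 1) = 2 * (q &&& (q - 1)) := by
        have h1 : m - 1 = 2 * (q - 1) + 1 := by omega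
        rw [h1, hq2]
        have := land_bit q (q-1) 0 1 (by norm_num) (by norm_num)
        simpa using this
      have hcnt : cntN (k+1) m = cntN k q := by
        simp only [cntN]; rw [hq2]; simp [Nat.mul_div_cancel_left q (by norm_num : 0 < 2), Nat.mul_mod_right]
      have := ih q (by omega)
      rw [hcnt, hand, this]
      omega
    · -- m odd : m = 2 * (m/2) + 1
      obtain ⟨q, hq⟩ := ho
      have hand : m &&& (m - 1) = 2 * q := by
        have h1 : m = 2 * q + 1 := by omega
        have h2 : m - 1 = 2 * q + 0 := by omega
        rw [h2, h1]
        have := land_bit q q 1 0 (by norm_num) (by norm_num)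
        simpa using this
      have hcnt : cntN (k+1) m = 1 + cntN k q := by
        simp only [cntN]
        have h1 : m % 2 = 1 := by omega
        have h2 : m / 2 = q := by omega
        rw [h1, h2]
      have hz := cntN_eq_zero k q (by omega)
      rw [hcnt, hand]
      omega

theorem isValid_eq_cnt (n1 n2 : Int) (m : Nat)
    (hm : PySem.Int.bxor n1 n2 % 4294967296 = (m : Int)) :
    isValid n1 n2 = decide (cntN 32 m = 1) := by
  rw [isValid, go_eq, dcnt_eq_xcnt, ← xcnt_emod32, hm, xcnt_natCast]
  simp only [zero_add, decide_eq_decide]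
  omega

-- ===== VERDICT (by name: the statement is the Claim_ definition above) =====
theorem isValid_spec : Claim_equal_isValid := by
  intro n1 n2 _
  have h0 : (0:Int) ≤ PySem.Int.bxor n1 n2 % 4294967296 := Int.emod_nonneg _ (by norm_num)
  have hlt : PySem.Int.bxor n1 n2 % 4294967296 < 4294967296 := Int.emod_lt_of_pos _ (by norm_num)
  obtain ⟨m, hm⟩ : ∃ m : Nat, PySem.Int.bxor n1 n2 % 4294967296 = (m : Int) :=
    ⟨(PySem.Int.bxor n1 n2 % 4294967296).toNat, by omega⟩
  have hmlt : m < 4294967296 := by omega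
  simp only [Spec_isValid, isValid_alt]
  rw [band_mask, hm, isValid_eq_cnt n1 n2 m hm]
  rcases Nat.eq_zero_or_pos m with hz | hpos
  · subst hz
    simp [cntN_zero]
  · have hne : ((m : Int) != 0) = true := by simp; omega
    rw [hne, Bool.true_and]
    have hsub : (m : Int) - 1 = ((m - 1 : Nat) : Int) := by omega
    rw [hsub, PySem.Int.band_natCast]
    have hbeq : ((((m &&& (m - 1) : Nat)) : Int) == 0) = decide (m &&& (m - 1) = 0) := by
      by_cases h : m &&& (m - 1) = 0 <;> simp [h]
    rw [hbeq, decide_eq_decide, cntN_one_iff 32 m (by omega)]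
    omega
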